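-- pv_equiv track=rewrite | github.com/Naumenko-KM/Yandex_Algorithms | 5E - Красота превыше всего.py | find_shortest_segment_slow
-- ===== SOURCE A (Python) =====
-- def is_segment_full(segment, classes):
--     if set(segment) == classes:
--         return True
--     else:
--         return False
--
-- def find_shortest_segment_slow(N, trees):
--     i_best = 1
--     j_best = len(trees)
--     classes = set(trees)
--     for i in range(N):
--         for j in range(N):
--             if i > j:
--                 continue
--             segment = trees[i:j+1]
--             if is_segment_full(segment, classes):
--                 if j - i < j_best - i_best:
--                     i_best = i + 1
--                     j_best = j + 1
--     return i_best, j_best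
-- ===== SOURCE B (Python) =====
-- def find_shortest_segment_slow(N, trees):
--     # Sliding window (two pointers) over the first min(N, len(trees)) trees:
--     # for each left end i, advance the right end j until every class appears,
--     # keeping the leftmost strictly-shortest window; same result as the
--     # brute-force scan, in O(n) instead of O(n^3).
--     n = len(trees)
--     m = min(N, n)
--     K = len(set(trees))
--     best_i, best_j = 1, n
--     cnt = {}
--     have = 0
--     j = 0
--     for i in range(m):
--         while j < m and have < K:
--             c = trees[j]
--             cnt[c] = cnt.get(c, 0) + 1
--             if cnt[c] == 1:
--                 have += 1
--             j += 1
--         if have == K and (j - 1) - i < best_j - best_i: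
--             best_i, best_j = i + 1, j
--         c = trees[i]
--         cnt[c] -= 1
--         if cnt[c] == 0:
--             have -= 1
--     return best_i, best_j
-- ===== Notes on version B (the rewrite author's own statement) =====
-- stated objective: faster
-- what changed: Replaces the brute-force scan over all (i, j) pairs with per-pair slicing and set comparison by a single sliding-window (two-pointer) pass over the first min(N, len(trees)) trees that maintains a class counter and keeps the leftmost strictly-shortest full window.
import Mathlib
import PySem

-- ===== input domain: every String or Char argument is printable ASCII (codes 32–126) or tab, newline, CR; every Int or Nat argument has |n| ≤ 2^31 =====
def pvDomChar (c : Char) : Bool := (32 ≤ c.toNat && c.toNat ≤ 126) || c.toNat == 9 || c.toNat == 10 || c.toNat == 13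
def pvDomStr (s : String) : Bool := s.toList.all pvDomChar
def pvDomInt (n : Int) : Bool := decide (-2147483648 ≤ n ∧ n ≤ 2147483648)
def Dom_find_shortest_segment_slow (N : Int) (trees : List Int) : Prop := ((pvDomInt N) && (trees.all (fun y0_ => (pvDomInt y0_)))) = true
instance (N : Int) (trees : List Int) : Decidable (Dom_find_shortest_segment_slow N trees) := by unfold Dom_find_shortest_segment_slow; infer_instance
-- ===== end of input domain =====

-- B replaces A's brute-force scan over all (i, j) pairs with a single sliding-window
-- (two-pointer) pass over the first min(N, len(trees)) trees, keeping a class counter;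
-- same return value on every input (a timing run measures the speed difference).

-- ===== PORT A =====
def is_segment_full (segment : List Int) (classes : PySem.Set Int) : Bool :=
  if PySem.Set.equal (PySem.Set.ofList segment) classes then true else false

def find_shortest_segment_slow (N : Int) (trees : List Int) : Int × Int :=
  let classes := PySem.Set.ofList trees
  (PySem.List.pyRange 0 N 1).foldl (fun st i =>
    (PySem.List.pyRange 0 N 1).foldl (fun st j =>
      if i > j then st
      else
        let segment := PySem.List.slice trees (some i) (some (j + 1))
        if is_segment_full segment classes then
          if j - i < st.2 - st.1 then (i + 1, j + 1) else st
        else st) st) (1, (trees.length : Int))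

-- ===== PORT B =====
-- the 'while j < m and have < K' loop of Source B (recursion on the distance to m)
def slidingAdvance (trees : List Int) (m K : Int) (cnt : PySem.Dict Int Int) (hv j : Int) :
    PySem.Dict Int Int × Int × Int :=
  if h : j < m ∧ hv < K then
    let c := PySem.List.pyGetD trees j 0
    let cnt' := cnt.insert c (cnt.getD c 0 + 1)
    let hv' := if cnt'.getD c 0 = 1 then hv + 1 else hv
    slidingAdvance trees m K cnt' hv' (j + 1)
  else (cnt, hv, j)
termination_by (m - j).toNat
decreasing_by omega

def find_shortest_segment_slow_alt (N : Int) (trees : List Int) : Int × Int :=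
  let n : Int := trees.length
  let m := min N n
  let K : Int := (PySem.Set.ofList trees).length
  let final := (PySem.List.pyRange 0 m 1).foldl (fun st i =>
    let best := st.1
    let s1 := slidingAdvance trees m K st.2.1 st.2.2.1 st.2.2.2
    let cnt := s1.1
    let hv := s1.2.1
    let j := s1.2.2
    let best := if hv = K ∧ (j - 1) - i < best.2 - best.1 then (i + 1, j) else best
    let c := PySem.List.pyGetD trees i 0
    let cnt2 := cnt.insert c (cnt.getD c 0 - 1)
    let hv2 := if cnt2.getD c 0 = 0 then hv - 1 else hv
    (best, cnt2, hv2, j)) ((1, n), PySem.Dict.empty, 0, 0)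
  final.1

-- ===== PRECONDITION & SPEC =====
def Spec_find_shortest_segment_slow (N : Int) (trees : List Int) (out : Int × Int) : Prop := out = find_shortest_segment_slow_alt N trees
instance (N : Int) (trees : List Int) (out : Int × Int) : Decidable (Spec_find_shortest_segment_slow N trees out) := by unfold Spec_find_shortest_segment_slow; infer_instance

-- ===== CLAIM (what is proved, stated in full; the proofs are below) =====
def Claim_equal_find_shortest_segment_slow : Prop := ∀ (N : Int) (trees : List Int), Dom_find_shortest_segment_slow N trees → Spec_find_shortest_segment_slow N trees (find_shortest_segment_slow N trees)

-- ===== LEMMAS AND PROOFS =====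

-- the window trees[i:j] (Nat indices, clamped like Python slices)
def winL (L : List Int) (i j : Nat) : List Int := (L.drop i).take (j - i)

-- "the window trees[i:e] contains every class" — what is_segment_full decides
def FuP (L : List Int) (i e : Nat) : Prop := ∀ c ∈ L, c ∈ winL L i e

def FuPd (L : List Int) (i e : Nat) : Decidable (FuP L i e) := by unfold FuP; infer_instance

-- minimal exclusive right end e with FuP L i e (0 if none exists)
def eMin (L : List Int) (i : Nat) : Nat :=
  @dite _ (FuP L i L.length) (FuPd L i L.length)
    (fun h => @Nat.find _ (fun e => FuPd L i e) (⟨L.length, h⟩ : ∃ e, FuP L i e))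
    (fun _ => 0)

-- one outer iteration of the collapsed algorithm: the unique candidate window for left end i
def mid (L : List Int) (m : Nat) (st : Int × Int) (i : Nat) : Int × Int :=
  @ite _ (FuP L i m) (FuPd L i m)
    (@ite _ ((eMin L i : Int) - 1 - i < st.2 - st.1) (by infer_instance)
      ((i : Int) + 1, (eMin L i : Int)) st)
    st

-- ---- basic window lemmas ----

theorem mem_winL {L : List Int} {c : Int} {i j : Nat} :
    c ∈ winL L i j ↔ ∃ k, i ≤ k ∧ k < j ∧ L[k]? = some c := by
  unfold winL
  rw [List.mem_take_iff_getElem]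
  constructor
  · rintro ⟨t, ht, h⟩
    have hlen : t < (L.drop i).length := lt_of_lt_of_le ht (min_le_right _ _)
    have hjt : t < j - i := lt_of_lt_of_le ht (min_le_left _ _)
    rw [List.length_drop] at hlen
    refine ⟨i + t, Nat.le_add_right _ _, by omega, ?_⟩
    rw [← List.getElem?_drop, List.getElem?_eq_getElem (lt_of_lt_of_le ht (min_le_right _ _)), h]
  · rintro ⟨k, hik, hkj, hk⟩
    have hkl : k < L.length := by
      by_contra hno
      rw [List.getElem?_eq_none (by omega)] at hk
      simp at hk
    refine ⟨k - i, by simp [List.length_drop]; omega, ?_⟩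
    have h1 : (L.drop i)[k - i]? = some c := by
      rw [List.getElem?_drop, show i + (k - i) = k by omega, hk]
    have h2 := List.getElem?_eq_getElem (l := L.drop i) (i := k - i)
      (by rw [List.length_drop]; omega)
    rw [h2] at h1
    simpa using h1

theorem FuP_mono_e {L : List Int} {i e e' : Nat} (h : FuP L i e) (hee : e ≤ e') : FuP L i e' := by
  intro c hc
  obtain ⟨k, h1, h2, h3⟩ := mem_winL.mp (h c hc)
  exact mem_winL.mpr ⟨k, h1, by omega, h3⟩

theorem FuP_anti_i {L : List Int} {i i' e : Nat} (h : FuP L i e) (hii : i' ≤ i) : FuP L i' e := by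
  intro c hc
  obtain ⟨k, h1, h2, h3⟩ := mem_winL.mp (h c hc)
  exact mem_winL.mpr ⟨k, by omega, h2, h3⟩

theorem FuP_to_len {L : List Int} {i e : Nat} (h : FuP L i e) : FuP L i L.length := by
  intro c hc
  obtain ⟨k, h1, h2, h3⟩ := mem_winL.mp (h c hc)
  have hkl : k < L.length := by
    by_contra hno
    rw [List.getElem?_eq_none (by omega)] at h3
    simp at h3
  exact mem_winL.mpr ⟨k, h1, hkl, h3⟩

theorem FuP_pos {L : List Int} (hL : L ≠ []) {i e : Nat} (h : FuP L i e) :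
    i < e ∧ i < L.length := by
  obtain ⟨c, hc⟩ := List.exists_mem_of_ne_nil L hL
  obtain ⟨k, h1, h2, h3⟩ := mem_winL.mp (h c hc)
  have hkl : k < L.length := by
    by_contra hno
    rw [List.getElem?_eq_none (by omega)] at h3
    simp at h3
  exact ⟨by omega, by omega⟩

theorem winL_subset {L : List Int} {i j : Nat} : winL L i j ⊆ L := by
  intro c hc
  have h1 : c ∈ L.drop i := List.take_subset _ _ hc
  exact List.drop_subset i L h1

theorem winL_succ_right {L : List Int} {i j : Nat} (hij : i ≤ j) (hj : j < L.length) :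
    winL L i (j + 1) = winL L i j ++ [L[j]] := by
  unfold winL
  rw [show j + 1 - i = (j - i) + 1 by omega, List.take_add_one]
  congr 1
  rw [List.getElem?_drop, show i + (j - i) = j by omega, List.getElem?_eq_getElem hj]
  rfl

theorem winL_cons {L : List Int} {i j : Nat} (hij : i < j) (hi : i < L.length) :
    winL L i j = L[i] :: winL L (i + 1) j := by
  unfold winL
  rw [List.drop_eq_getElem_cons hi, show j - i = (j - (i + 1)) + 1 by omega]
  rfl

-- ---- eMin lemmas ----

theorem eMin_le {L : List Int} {i e : Nat} (h : FuP L i e) : eMin L i ≤ e := by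
  letI : DecidablePred (FuP L i) := fun e => FuPd L i e
  unfold eMin
  rw [dif_pos (FuP_to_len h)]
  exact Nat.find_le h

theorem eMin_full {L : List Int} {i e : Nat} (h : FuP L i e) : FuP L i (eMin L i) := by
  letI : DecidablePred (FuP L i) := fun e => FuPd L i e
  unfold eMin
  rw [dif_pos (FuP_to_len h)]
  exact Nat.find_spec (⟨L.length, FuP_to_len h⟩ : ∃ e, FuP L i e)

theorem eMin_eq {L : List Int} {i e : Nat} (h : FuP L i e) (hmin : ∀ e' < e, ¬ FuP L i e') :
    eMin L i = e := by
  refine le_antisymm (eMin_le h) ?_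
  by_contra hno
  exact hmin _ (by omega) (eMin_full h)

-- ---- counting lemmas ----

theorem setLen_eq_card (L : List Int) : (PySem.Set.ofList L).length = L.toFinset.card := by
  have h1 : (PySem.Set.ofList L).toFinset = L.toFinset := by
    ext x
    simp [List.mem_toFinset, PySem.Set.mem_ofList]
  rw [← List.toFinset_card_of_nodup (PySem.Set.nodup_ofList L), h1]

theorem card_le_card {L : List Int} {i j : Nat} :
    (winL L i j).toFinset.card ≤ L.toFinset.card := by
  exact Finset.card_le_card (fun c hc => List.mem_toFinset.mpr
    (winL_subset (List.mem_toFinset.mp hc)))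

theorem card_iff_full {L : List Int} {i j : Nat} :
    FuP L i j ↔ (winL L i j).toFinset.card = L.toFinset.card := by
  have hsub : (winL L i j).toFinset ⊆ L.toFinset :=
    fun c hc => List.mem_toFinset.mpr (winL_subset (List.mem_toFinset.mp hc))
  constructor
  · intro h
    refine le_antisymm card_le_card (Finset.card_le_card (fun c hc => ?_))
    exact List.mem_toFinset.mpr (h c (List.mem_toFinset.mp hc))
  · intro h c hc
    have h2 := Finset.eq_of_subset_of_card_le hsub (le_of_eq h.symm)
    exact List.mem_toFinset.mp (h2 ▸ List.mem_toFinset.mpr hc)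

-- ---- generic fold helper ----

theorem foldl_id {α β : Type} {l : List β} {f : α → β → α} {a : α}
    (h : ∀ st x, x ∈ l → f st x = st) : l.foldl f a = a := by
  induction l generalizing a with
  | nil => rfl
  | cons x xs ih =>
    rw [List.foldl_cons, h a x (by simp)]
    exact ih (fun st y hy => h st y (by simp [hy]))

theorem foldl_inv {α β : Type} {P : α → Prop} {l : List β} {f : α → β → α} {a : α}
    (h : ∀ st x, x ∈ l → P st → P (f st x)) (ha : P a) : P (l.foldl f a) := by
  induction l generalizing a with
  | nil => exact ha
  | cons x xs ih =>
    rw [List.foldl_cons]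
    exact ih (fun st y hy => h st y (by simp [hy])) (h a x (by simp) ha)

-- ---- A-side: the inner loop body of A, on Nat indices ----

def Abody (L : List Int) (st : Int × Int) (i j : Nat) : Int × Int :=
  if (i : Int) > (j : Int) then st
  else
    if is_segment_full (PySem.List.slice L (some (i : Int)) (some ((j : Int) + 1)))
        (PySem.Set.ofList L) then
      if (j : Int) - (i : Int) < st.2 - st.1 then ((i : Int) + 1, (j : Int) + 1) else st
    else st

theorem slice_eq_winL (L : List Int) (i j : Nat) :
    PySem.List.slice L (some (i : Int)) (some ((j : Int) + 1)) = winL L i (j + 1) := by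
  rw [show ((j : Int) + 1) = ((j + 1 : Nat) : Int) by push_cast; ring, PySem.List.slice_natCast]
  rfl

theorem is_full_iff {L seg : List Int} (hsub : seg ⊆ L) :
    is_segment_full seg (PySem.Set.ofList L) = true ↔ ∀ c ∈ L, c ∈ seg := by
  have hdef : is_segment_full seg (PySem.Set.ofList L)
      = PySem.Set.equal (PySem.Set.ofList seg) (PySem.Set.ofList L) := by
    simp [is_segment_full]
  rw [hdef, PySem.Set.equal_iff]
  constructor
  · intro h c hc
    exact (PySem.Set.mem_ofList _ _).mp
      ((h c).mpr ((PySem.Set.mem_ofList _ _).mpr hc))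
  · intro h x
    rw [PySem.Set.mem_ofList, PySem.Set.mem_ofList]
    exact ⟨fun hx => hsub hx, fun hx => h x hx⟩

theorem A_unfold (N : Int) (L : List Int) :
    find_shortest_segment_slow N L =
      (List.range N.toNat).foldl (fun st i =>
        (List.range N.toNat).foldl (fun st j => Abody L st i j) st) (1, (L.length : Int)) := by
  simp only [find_shortest_segment_slow, PySem.List.pyRange_one, Int.sub_zero,
    List.foldl_map, zero_add, Abody]

theorem inner_collapse {L : List Int} (hL : L ≠ []) (i : Nat) :
    ∀ (M : Nat) (st : Int × Int),
      (List.range M).foldl (fun st j => Abody L st i j) st = mid L M st i := by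
  intro M
  induction M with
  | zero =>
    intro st
    have h0 : ¬ FuP L i 0 := fun h => by have := (FuP_pos hL h).1; omega
    simp [mid, h0]
  | succ M ih =>
    intro st
    rw [List.range_succ, List.foldl_append, List.foldl_cons, List.foldl_nil, ih st]
    by_cases hMf : FuP L i (M + 1)
    · have hiM : i < M + 1 := (FuP_pos hL hMf).1
      have hij : ¬ ((i : Int) > (M : Int)) := by omega
      have hfull : is_segment_full (PySem.List.slice L (some (i : Int)) (some ((M : Int) + 1)))
          (PySem.Set.ofList L) = true := by
        rw [slice_eq_winL]
        exact (is_full_iff winL_subset).mpr hMf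
      by_cases hM : FuP L i M
      · have he : eMin L i ≤ M := eMin_le hM
        simp only [mid]
        rw [if_pos hM, if_pos hMf]
        unfold Abody
        rw [if_neg hij, hfull]
        simp only [if_true]
        by_cases hkey : (eMin L i : Int) - 1 - (i : Int) < st.2 - st.1
        · rw [if_pos hkey]
          split_ifs with h2
          · exfalso
            simp only [] at h2
            omega
          · rfl
        · rw [if_neg hkey]
          split_ifs with h2
          · exfalso
            omega
          · rfl
      · have he : eMin L i = M + 1 := by
          refine eMin_eq hMf (fun e' he' hf => hM ?_)
          exact FuP_mono_e hf (by omega)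
        simp only [mid]
        rw [if_neg hM, if_pos hMf, he]
        unfold Abody
        rw [if_neg hij, hfull]
        simp only [if_true]
        have harith : ((M + 1 : Nat) : Int) - 1 - (i : Int) = (M : Int) - (i : Int) := by
          push_cast; ring
        rw [harith]
        norm_cast
    · have hM : ¬ FuP L i M := fun h => hMf (FuP_mono_e h (by omega))
      simp only [mid]
      rw [if_neg hM, if_neg hMf]
      unfold Abody
      by_cases hij : (i : Int) > (M : Int)
      · rw [if_pos hij]
      · rw [if_neg hij, slice_eq_winL]
        rw [if_neg (fun hf => hMf ((is_full_iff winL_subset).mp hf))]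

theorem mid_out {L : List Int} (hL : L ≠ []) {m i : Nat} (hi : L.length ≤ i) (st : Int × Int) :
    mid L m st i = st := by
  unfold mid
  rw [if_neg]
  intro h
  exact absurd (FuP_pos hL h).2 (by omega)

theorem mid_congr {L : List Int} {m m' : Nat} (hm : L.length ≤ m) (hm' : L.length ≤ m')
    (st : Int × Int) (i : Nat) : mid L m st i = mid L m' st i := by
  unfold mid
  by_cases h : FuP L i m
  · rw [if_pos h, if_pos (FuP_mono_e (FuP_to_len h) hm')]
  · rw [if_neg h, if_neg (fun h' => h (FuP_mono_e (FuP_to_len h') hm))]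

theorem LA {L : List Int} (hL : L ≠ []) (N : Int) :
    find_shortest_segment_slow N L =
      (List.range (min N (L.length : Int)).toNat).foldl
        (mid L (min N (L.length : Int)).toNat) (1, (L.length : Int)) := by
  rw [A_unfold]
  have hfn : (fun (st : Int × Int) (i : Nat) =>
      (List.range N.toNat).foldl (fun st j => Abody L st i j) st)
      = fun st i => mid L N.toNat st i := by
    funext st i
    exact inner_collapse hL i N.toNat st
  rw [hfn]
  rcases le_or_gt N ((L.length : Nat) : Int) with hNn | hNn
  · rw [min_eq_left hNn]
  · rw [min_eq_right (le_of_lt hNn)]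
    have hlen : ((L.length : Nat) : Int).toNat = L.length := Int.toNat_natCast _
    rw [hlen]
    have hle : L.length ≤ N.toNat := by omega
    have hsplit : N.toNat = L.length + (N.toNat - L.length) := by omega
    rw [hsplit, List.range_add, List.foldl_append, List.foldl_map]
    rw [foldl_id (fun st x _ => mid_out hL (by omega) st)]
    have hfn2 : (fun (st : Int × Int) (i : Nat) => mid L (L.length + (N.toNat - L.length)) st i)
        = fun st i => mid L L.length st i := by
      funext st i
      exact mid_congr (Nat.le_add_right _ _) le_rfl st i
    rw [hfn2]

-- ---- B-side ----

def Bbody (L : List Int) (m K : Int) (st : (Int × Int) × PySem.Dict Int Int × Int × Int)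
    (i : Int) : (Int × Int) × PySem.Dict Int Int × Int × Int :=
  let best := st.1
  let s1 := slidingAdvance L m K st.2.1 st.2.2.1 st.2.2.2
  let cnt := s1.1
  let hv := s1.2.1
  let j := s1.2.2
  let best := if hv = K ∧ (j - 1) - i < best.2 - best.1 then (i + 1, j) else best
  let c := PySem.List.pyGetD L i 0
  let cnt2 := cnt.insert c (cnt.getD c 0 - 1)
  let hv2 := if cnt2.getD c 0 = 0 then hv - 1 else hv
  (best, cnt2, hv2, j)

theorem B_unfold (N : Int) (L : List Int) :
    find_shortest_segment_slow_alt N L =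
      (((List.range (min N (L.length : Int)).toNat).map (fun k : Nat => (k : Int))).foldl
        (Bbody L (min N (L.length : Int)) (((PySem.Set.ofList L).length : Nat) : Int))
        ((1, (L.length : Int)), PySem.Dict.empty, 0, 0)).1 := by
  simp only [find_shortest_segment_slow_alt, PySem.List.pyRange_one, Int.sub_zero, zero_add]
  rfl

def bInv (L : List Int) (mN : Nat) (i : Nat)
    (st : (Int × Int) × PySem.Dict Int Int × Int × Int) : Prop :=
  st.1 = (List.range i).foldl (mid L mN) (1, (L.length : Int)) ∧
  ∃ j : Nat, st.2.2.2 = (j : Int) ∧ i ≤ j ∧ j ≤ mN ∧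
    (∀ c, st.2.1.getD c 0 = ((winL L i j).count c : Int)) ∧
    st.2.2.1 = ((winL L i j).toFinset.card : Int) ∧
    (∀ e < j, ¬ FuP L i e)

def advPost (L : List Int) (mN : Nat) (K : Int) (i j' : Nat)
    (r : PySem.Dict Int Int × Int × Int) : Prop :=
  r.2.2 = (j' : Int) ∧ j' ≤ mN ∧
  (∀ c, r.1.getD c 0 = ((winL L i j').count c : Int)) ∧
  r.2.1 = ((winL L i j').toFinset.card : Int) ∧
  (∀ e < j', ¬ FuP L i e) ∧
  (((winL L i j').toFinset.card : Int) ≠ K → j' = mN)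

theorem adv_spec {L : List Int} {mN : Nat} (hm : mN ≤ L.length) (i : Nat) :
    ∀ (j : Nat) (cnt : PySem.Dict Int Int),
      j ≤ mN → i ≤ j →
      (∀ c, cnt.getD c 0 = ((winL L i j).count c : Int)) →
      (∀ e < j, ¬ FuP L i e) →
      ∃ j', j ≤ j' ∧ advPost L mN ((L.toFinset.card : Nat) : Int) i j'
        (slidingAdvance L (mN : Int) ((L.toFinset.card : Nat) : Int) cnt
          ((winL L i j).toFinset.card : Int) (j : Int)) := by
  suffices H : ∀ (k j : Nat) (cnt : PySem.Dict Int Int), mN - j ≤ k → j ≤ mN → i ≤ j →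
      (∀ c, cnt.getD c 0 = ((winL L i j).count c : Int)) →
      (∀ e < j, ¬ FuP L i e) →
      ∃ j', j ≤ j' ∧ advPost L mN ((L.toFinset.card : Nat) : Int) i j'
        (slidingAdvance L (mN : Int) ((L.toFinset.card : Nat) : Int) cnt
          ((winL L i j).toFinset.card : Int) (j : Int)) by
    intro j cnt hj hij hcnt hmin
    exact H mN j cnt (by omega) hj hij hcnt hmin
  intro k
  induction k with
  | zero =>
    intro j cnt hk hj hij hcnt hmin
    have hje : j = mN := by omega
    rw [slidingAdvance, dif_neg (by omega)]
    exact ⟨j, le_rfl, rfl, hj, hcnt, rfl, hmin, fun _ => hje⟩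
  | succ k ih =>
    intro j cnt hk hj hij hcnt hmin
    by_cases hcond : ((j : Int) < ((mN : Nat) : Int) ∧
        ((winL L i j).toFinset.card : Int) < ((L.toFinset.card : Nat) : Int))
    · have hjm : j < mN := by exact_mod_cast hcond.1
      have hcard : (winL L i j).toFinset.card < L.toFinset.card := by exact_mod_cast hcond.2
      have hjlen : j < L.length := lt_of_lt_of_le hjm hm
      have hc : PySem.List.pyGetD L (j : Int) 0 = L[j] := by
        rw [PySem.List.pyGetD_natCast, List.getD_eq_getElem _ _ hjlen]
      have hnotfull : ¬ FuP L i j := fun hf => absurd (card_iff_full.mp hf) (by omega)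
      have hwin : winL L i (j + 1) = winL L i j ++ [L[j]] := winL_succ_right hij hjlen
      have hcnt' : ∀ c', ((cnt.insert (PySem.List.pyGetD L (j : Int) 0)
          (cnt.getD (PySem.List.pyGetD L (j : Int) 0) 0 + 1)).getD c' 0)
          = ((winL L i (j + 1)).count c' : Int) := by
        intro c'
        rw [hc, PySem.Dict.getD_insert, hwin, List.count_append]
        by_cases hcc : c' = L[j]
        · rw [if_pos hcc, hcc, hcnt L[j]]
          simp
        · rw [if_neg hcc, hcnt c']
          have h0 : [L[j]].count c' = 0 := by
            simp [Ne.symm hcc]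
          rw [h0]
          simp
      have hhv' : ((if (cnt.insert (PySem.List.pyGetD L (j : Int) 0)
            (cnt.getD (PySem.List.pyGetD L (j : Int) 0) 0 + 1)).getD
              (PySem.List.pyGetD L (j : Int) 0) 0 = 1 then
            ((winL L i j).toFinset.card : Int) + 1 else ((winL L i j).toFinset.card : Int)))
          = ((winL L i (j + 1)).toFinset.card : Int) := by
        rw [hcnt' (PySem.List.pyGetD L (j : Int) 0), hc]
        have hcard1 : (winL L i (j + 1)).count L[j] = (winL L i j).count L[j] + 1 := by
          rw [hwin, List.count_append]
          simp
        have hcardset : (winL L i (j + 1)).toFinset = insert L[j] (winL L i j).toFinset := by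
          rw [hwin, List.toFinset_append]
          simp
        by_cases hmem : L[j] ∈ winL L i j
        · have : (winL L i j).count L[j] ≠ 0 := by
            rw [Ne, List.count_eq_zero]
            exact fun h => h hmem
          rw [if_neg (by rw [hcard1]; push_cast; omega), hcardset,
            Finset.card_insert_of_mem (List.mem_toFinset.mpr hmem)]
        · have : (winL L i j).count L[j] = 0 := List.count_eq_zero.mpr hmem
          rw [if_pos (by rw [hcard1, this]; norm_num), hcardset,
            Finset.card_insert_of_notMem (fun h => hmem (List.mem_toFinset.mp h))]
          push_cast
          ring
      have hmin' : ∀ e < j + 1, ¬ FuP L i e := by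
        intro e he
        rcases Nat.lt_or_ge e j with h | h
        · exact hmin e h
        · have : e = j := by omega
          rw [this]
          exact hnotfull
      rw [slidingAdvance, dif_pos hcond]
      simp only []
      rw [hhv', show ((j : Int) + 1) = (((j + 1 : Nat) : Nat) : Int) by push_cast; ring]
      obtain ⟨j', h1, h2⟩ := ih (j + 1)
        (cnt.insert (PySem.List.pyGetD L (j : Int) 0)
          (cnt.getD (PySem.List.pyGetD L (j : Int) 0) 0 + 1))
        (by omega) (by omega) (by omega) hcnt' hmin'
      exact ⟨j', by omega, h2⟩
    · rw [slidingAdvance, dif_neg hcond]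
      refine ⟨j, le_rfl, rfl, hj, hcnt, rfl, hmin, fun hne => ?_⟩
      have hle := card_le_card (L := L) (i := i) (j := j)
      rcases not_and_or.mp hcond with h | h
      · omega
      · exfalso
        apply hne
        omega

theorem B_step {L : List Int} (hL : L ≠ []) {mN : Nat} (hm : mN ≤ L.length) {i : Nat}
    (hi : i < mN) {st : (Int × Int) × PySem.Dict Int Int × Int × Int} (h : bInv L mN i st) :
    bInv L mN (i + 1) (Bbody L (mN : Int) ((L.toFinset.card : Nat) : Int) st (i : Int)) := by
  obtain ⟨best, cnt, hv, jv⟩ := st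
  obtain ⟨hbest, j, hj_eq, hij, hjm, hcnt, hhv, hmin⟩ := h
  simp only [] at hj_eq hij hjm hcnt hhv hmin hbest
  subst hj_eq
  subst hhv
  have hilen : i < L.length := lt_of_lt_of_le hi hm
  obtain ⟨j', hjj', hpost⟩ := adv_spec hm i j cnt hjm hij hcnt hmin
  unfold advPost at hpost
  obtain ⟨hr2, hj'm, hcnt', hhv', hmin'', hKmn⟩ := hpost
  have hij' : i < j' := by
    by_cases hfull : (winL L i j').toFinset.card = L.toFinset.card
    · exact ((FuP_pos hL (card_iff_full.mpr hfull)).1)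
    · have := hKmn (by exact_mod_cast hfull)
      omega
  have hci : PySem.List.pyGetD L (i : Int) 0 = L[i] := by
    rw [PySem.List.pyGetD_natCast, List.getD_eq_getElem _ _ hilen]
  have hwin : winL L i j' = L[i] :: winL L (i + 1) j' := winL_cons hij' hilen
  unfold Bbody bInv
  simp only []
  refine ⟨?_, j', hr2, by omega, hj'm, ?_, ?_, ?_⟩
  · -- best component
    rw [List.range_succ, List.foldl_append, List.foldl_cons, List.foldl_nil, ← hbest]
    by_cases hfull : (winL L i j').toFinset.card = L.toFinset.card
    · have hFu : FuP L i j' := card_iff_full.mpr hfull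
      have hemin : eMin L i = j' := eMin_eq hFu hmin''
      have hFum : FuP L i mN := FuP_mono_e hFu hj'm
      unfold mid
      rw [if_pos hFum, hemin]
      by_cases hkey : ((j' : Nat) : Int) - 1 - (i : Int) < best.2 - best.1
      · rw [if_pos hkey, if_pos ⟨by rw [hhv', hfull], by rw [hr2]; exact hkey⟩, hr2]
      · rw [if_neg hkey, if_neg (fun hc => hkey (by rw [← hr2]; exact hc.2))]
    · have hj'mN : j' = mN := hKmn (by exact_mod_cast hfull)
      have hnFu : ¬ FuP L i mN := fun hf => hfull (hj'mN ▸ card_iff_full.mp hf)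
      unfold mid
      rw [if_neg hnFu, if_neg (fun hc => hfull (by exact_mod_cast hhv' ▸ hc.1))]
  · -- cnt component
    intro c'
    rw [hci, PySem.Dict.getD_insert]
    by_cases hcc : c' = L[i]
    · rw [if_pos hcc, hcc, hcnt' L[i]]
      have : (winL L i j').count L[i] = (winL L (i + 1) j').count L[i] + 1 := by
        rw [hwin]
        simp
      rw [this]
      push_cast
      ring
    · rw [if_neg hcc, hcnt' c']
      have : (winL L i j').count c' = (winL L (i + 1) j').count c' := by
        rw [hwin, List.count_cons]
        simp [Ne.symm hcc]
      rw [this]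
  · -- hv component
    rw [hci, PySem.Dict.getD_insert, if_pos rfl, hcnt' L[i], hhv']
    have hcnt1 : (winL L i j').count L[i] = (winL L (i + 1) j').count L[i] + 1 := by
      rw [hwin]
      simp
    have hcardset : (winL L i j').toFinset = insert L[i] (winL L (i + 1) j').toFinset := by
      rw [hwin]
      simp
    by_cases hmem : L[i] ∈ winL L (i + 1) j'
    · have hne : (winL L (i + 1) j').count L[i] ≠ 0 :=
        fun h0 => (List.count_eq_zero.mp h0) hmem
      rw [if_neg (by rw [hcnt1]; push_cast; omega), hcardset,
        Finset.card_insert_of_mem (List.mem_toFinset.mpr hmem)]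
    · have h0 : (winL L (i + 1) j').count L[i] = 0 := List.count_eq_zero.mpr hmem
      rw [if_pos (by rw [hcnt1, h0]; norm_num), hcardset,
        Finset.card_insert_of_notMem (fun h => hmem (List.mem_toFinset.mp h))]
      push_cast
      ring
  · -- minimality
    intro e he
    exact fun hf => hmin'' e he (FuP_anti_i hf (by omega))

theorem B_fold {L : List Int} (hL : L ≠ []) {mN : Nat} (hm : mN ≤ L.length) :
    ∀ i ≤ mN, bInv L mN i
      ((List.range i).foldl
        (fun st (k : Nat) => Bbody L (mN : Int) ((L.toFinset.card : Nat) : Int) st (k : Int))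
        ((1, (L.length : Int)), PySem.Dict.empty, 0, 0)) := by
  intro i
  induction i with
  | zero =>
    intro _
    unfold bInv
    refine ⟨by simp, 0, rfl, le_rfl, Nat.zero_le _, ?_, by simp [winL], by omega⟩
    intro c
    simp [winL, PySem.Dict.getD_empty]
  | succ i ih =>
    intro hi
    rw [List.range_succ, List.foldl_append, List.foldl_cons, List.foldl_nil]
    exact B_step hL hm (by omega) (ih (by omega))

theorem LB {L : List Int} (hL : L ≠ []) (N : Int) :
    find_shortest_segment_slow_alt N L =
      (List.range (min N (L.length : Int)).toNat).foldl
        (mid L (min N (L.length : Int)).toNat) (1, (L.length : Int)) := by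
  rw [B_unfold, List.foldl_map]
  rcases le_or_gt (min N ((L.length : Nat) : Int)) 0 with hm0 | hm0
  · rw [show (min N ((L.length : Nat) : Int)).toNat = 0 by omega]
    simp
  · have hmn : min N ((L.length : Nat) : Int) = (((min N ((L.length : Nat) : Int)).toNat : Nat) : Int) := by
      omega
    have hmlen : (min N ((L.length : Nat) : Int)).toNat ≤ L.length := by
      have h1 : min N ((L.length : Nat) : Int) ≤ ((L.length : Nat) : Int) := min_le_right _ _
      omega
    have hK : (((PySem.Set.ofList L).length : Nat) : Int) = ((L.toFinset.card : Nat) : Int) := by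
      rw [setLen_eq_card]
    rw [hmn, hK]
    simp only [Int.toNat_natCast]
    exact (B_fold hL hmlen _ le_rfl).1

theorem A_nil (N : Int) : find_shortest_segment_slow N [] = (1, 0) := by
  have hbody : ∀ (st : Int × Int) (i j : Nat), st = (1, 0) → Abody [] st i j = (1, 0) := by
    rintro st i j rfl
    unfold Abody
    by_cases hij : (i : Int) > (j : Int)
    · rw [if_pos hij]
    · rw [if_neg hij]
      split
      · rw [if_neg (by simp; omega)]
      · rfl
  rw [A_unfold]
  have : ((List.range N.toNat).foldl (fun st i =>
      (List.range N.toNat).foldl (fun st j => Abody [] st i j) st)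
      (1, ((List.length ([] : List Int) : Nat) : Int))) = (1, 0) := by
    refine foldl_inv (P := fun st => st = (1, 0)) ?_ (by simp)
    intro st i _ hst
    exact foldl_inv (P := fun st => st = (1, 0)) (fun st j _ h => hbody st i j h) hst
  simpa using this

theorem B_nil (N : Int) : find_shortest_segment_slow_alt N [] = (1, 0) := by
  have hm : min N ((List.length ([] : List Int) : Nat) : Int) ≤ 0 := by simp
  simp only [find_shortest_segment_slow_alt, PySem.List.pyRange_one]
  rw [show (min N ((List.length ([] : List Int) : Nat) : Int) - 0).toNat = 0 by
    simp only [List.length_nil, Nat.cast_zero]; omega]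
  simp

-- ===== VERDICT (by name: the statement is the Claim_ definition above) =====
theorem find_shortest_segment_slow_spec : Claim_equal_find_shortest_segment_slow := by
  intro N L _
  unfold Spec_find_shortest_segment_slow
  rcases eq_or_ne L [] with rfl | hL
  · rw [A_nil, B_nil]
  · rw [LA hL, LB hL]
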